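-- pv_equiv track=rewrite | github.com/guicasgar/Playing_around_with_Python | MODULOS_Y_PAQUETES/Distribuible/GuillermoCastroGarciaT9/miscelanecadenas.py | cuatrovocales
-- ===== SOURCE A (Python) =====
-- def cuatrovocales(texto):
--     def contar_vocales(palabra):
--         return len(set(letra for letra in palabra if letra in "aeiouAEIOU")) >= 4
--
--     palabras = texto.split()
--     palabras_cuatro_vocales = []
--     for palabra in palabras:
--         if contar_vocales(palabra):
--             palabras_cuatro_vocales.append(palabra)
--
--     return len(palabras_cuatro_vocales)
-- ===== SOURCE B (Python) =====
-- VOCALES = "aeiouAEIOU"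
--
-- def cuatrovocales(texto):
--     # Count words directly (no intermediate list); per word, scan the fixed
--     # vowel alphabet and count how many of its 10 characters occur in the word.
--     return sum(1 for palabra in texto.split()
--                if sum(1 for v in VOCALES if v in palabra) >= 4)
-- ===== Notes on version B (the rewrite author's own statement) =====
-- stated objective: faster
-- what changed: B drops the intermediate list and the per-word set: it counts matching words with a single generator sum, and tests each word by scanning the fixed 10-character vowel alphabet and counting which vowels occur in the word, instead of collecting the word's vowel characters into a set and taking its size.
import Mathlib
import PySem

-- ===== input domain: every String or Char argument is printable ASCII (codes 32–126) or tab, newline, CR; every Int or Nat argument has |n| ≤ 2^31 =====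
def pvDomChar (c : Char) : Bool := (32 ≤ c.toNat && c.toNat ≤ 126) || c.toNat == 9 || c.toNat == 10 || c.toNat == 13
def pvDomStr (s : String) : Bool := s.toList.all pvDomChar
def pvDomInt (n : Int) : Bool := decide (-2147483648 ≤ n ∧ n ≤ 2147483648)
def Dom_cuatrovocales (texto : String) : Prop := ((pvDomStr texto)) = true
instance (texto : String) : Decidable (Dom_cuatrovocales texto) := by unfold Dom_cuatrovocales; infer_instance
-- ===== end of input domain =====

-- B drops the intermediate list and the per-word set: one countP over the words,
-- each word tested by counting which of the 10 fixed vowel characters occur in it.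

-- ===== PORT A =====
-- helper: contar_vocales(palabra) = len(set(letra for letra in palabra if letra in "aeiouAEIOU")) >= 4
def contarVocales (palabra : String) : Bool :=
  4 ≤ (PySem.Set.ofList (palabra.toList.filter (fun letra => "aeiouAEIOU".toList.contains letra))).length

def cuatrovocales (texto : String) : Int :=
  let palabras := PySem.Str.split₀ texto
  let palabrasCuatroVocales :=
    palabras.foldl (fun acc palabra => if contarVocales palabra then acc ++ [palabra] else acc) []
  PySem.List.len palabrasCuatroVocales

-- ===== PORT B =====
def vocalesB : List Char := "aeiouAEIOU".toList

def cuatrovocales_alt (texto : String) : Int :=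
  ((PySem.Str.split₀ texto).countP
    (fun palabra => 4 ≤ (vocalesB.countP (fun v => palabra.toList.contains v)) : String → Bool) : Int)

-- ===== PRECONDITION & SPEC =====
def Spec_cuatrovocales (texto : String) (out : Int) : Prop := out = cuatrovocales_alt texto
instance (texto : String) (out : Int) : Decidable (Spec_cuatrovocales texto out) := by unfold Spec_cuatrovocales; infer_instance

-- ===== CLAIM (what is proved, stated in full; the proofs are below) =====
def Claim_equal_cuatrovocales : Prop := ∀ (texto : String), Dom_cuatrovocales texto → Spec_cuatrovocales texto (cuatrovocales texto)

-- ===== LEMMAS AND PROOFS =====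

-- Distinct vowel characters of a word = vowels of the (duplicate-free) alphabet occurring in it.
theorem set_filter_length_eq_countP (w V : List Char) (hV : V.Nodup) :
    (PySem.Set.ofList (w.filter (fun c => V.contains c))).length
      = V.countP (fun v => w.contains v) := by
  rw [List.countP_eq_length_filter]
  apply List.Perm.length_eq
  apply (List.perm_ext_iff_of_nodup (PySem.Set.nodup_ofList _) (hV.filter _)).mpr
  intro c
  simp [PySem.Set.mem_ofList, List.mem_filter, and_comm]

theorem contarVocales_eq (palabra : String) :
    contarVocales palabra
      = (4 ≤ vocalesB.countP (fun v => palabra.toList.contains v) : Bool) := by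
  unfold contarVocales vocalesB
  rw [set_filter_length_eq_countP _ _ (by decide)]

-- ===== VERDICT (by name: the statement is the Claim_ definition above) =====
theorem cuatrovocales_spec : Claim_equal_cuatrovocales := by
  intro texto _
  unfold Spec_cuatrovocales cuatrovocales cuatrovocales_alt
  simp only []
  rw [PySem.List.foldl_append_if_eq_filter, PySem.List.len_eq]
  simp only [List.nil_append, List.countP_eq_length_filter]
  rw [List.filter_congr (l := PySem.Str.split₀ texto)
    (fun x _ => by rw [contarVocales_eq, List.countP_eq_length_filter])]
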